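-- pv_equiv track=rewrite | github.com/sga-encoder/404_Luck_Not_Found_Servidor | src/model/salaDeJuego/juego/KnuckleBones.py | proyector_de_jugadas_del_jugador
-- ===== SOURCE A (Python) =====
-- def proyector_de_jugadas_del_jugador(mesaDeJuego: list, indice_jugador: int) -> list:
--     jugadas = []
--     for i in range(6):
--         for j in range(3):
--             for k in range(3):
--                 if mesaDeJuego[indice_jugador][j][k] == 0:
--                     jugadas.append([ j, i + 1])
--                     break
--     return jugadas
-- ===== SOURCE B (Python) =====
-- def proyector_de_jugadas_del_jugador(mesaDeJuego: list, indice_jugador: int) -> list: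
--     tablero = mesaDeJuego[indice_jugador]
--     block = [(j, 1) for j in range(3) if any(tablero[j][k] == 0 for k in range(3))]
--     jugadas = []
--     for _ in range(6):
--         jugadas.extend([j, v] for j, v in block)
--         block = [(j, v + 1) for j, v in block]
--     return jugadas
-- ===== Notes on version B (the rewrite author's own statement) =====
-- stated objective: alternative
-- what changed: B builds the first block of placements (die value 1) for the rows holding an empty cell, then derives each of the five following blocks from the previous one by bumping the die value, instead of re-deriving every entry from nested index loops over die values, rows and cells.
import Mathlib
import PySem

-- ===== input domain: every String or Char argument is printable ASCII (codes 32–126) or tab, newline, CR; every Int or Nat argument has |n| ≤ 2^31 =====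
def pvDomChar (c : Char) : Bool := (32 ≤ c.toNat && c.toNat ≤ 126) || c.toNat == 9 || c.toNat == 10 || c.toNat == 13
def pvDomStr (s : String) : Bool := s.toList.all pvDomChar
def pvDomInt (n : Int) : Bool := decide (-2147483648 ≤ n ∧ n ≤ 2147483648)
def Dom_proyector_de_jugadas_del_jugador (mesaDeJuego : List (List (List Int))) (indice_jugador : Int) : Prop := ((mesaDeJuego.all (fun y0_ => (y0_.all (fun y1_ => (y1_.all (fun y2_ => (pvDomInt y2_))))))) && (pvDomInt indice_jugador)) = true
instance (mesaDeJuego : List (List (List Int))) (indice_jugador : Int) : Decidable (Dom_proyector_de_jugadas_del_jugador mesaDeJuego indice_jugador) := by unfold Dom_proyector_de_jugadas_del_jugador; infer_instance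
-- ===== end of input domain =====

-- B builds the die-value-1 block of placements once and derives the five following blocks
-- by bumping the die value of the previous block (objective: alternative; same return value).

-- ===== PORT A =====
-- the triple subscript mesaDeJuego[indice_jugador][j][k]; none = IndexError
def pvCellA (mesaDeJuego : List (List (List Int))) (indice_jugador : Int) (j k : Nat) : Option Int :=
  match PySem.List.pyGet? mesaDeJuego indice_jugador with
  | none => none
  | some b =>
    match PySem.List.pyGet? b (j : Int) with
    | none => none
    | some r => PySem.List.pyGet? r (k : Int)

-- A's inner k-loop with its break: scan k = 0,1,2, stop at the first zero cell
def pvRowScanA (mesaDeJuego : List (List (List Int))) (indice_jugador : Int) (j : Nat) : List Nat → Bool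
  | [] => false
  | k :: ks =>
    if pvCellA mesaDeJuego indice_jugador j k = some 0 then true
    else pvRowScanA mesaDeJuego indice_jugador j ks

def proyector_de_jugadas_del_jugador (mesaDeJuego : List (List (List Int))) (indice_jugador : Int) : List (List Int) :=
  (List.range 6).foldl (fun jugadas (i : Nat) =>
    (List.range 3).foldl (fun jugadas (j : Nat) =>
      if pvRowScanA mesaDeJuego indice_jugador j [0, 1, 2] then
        jugadas ++ [[(j : Int), (i : Int) + 1]]
      else jugadas) jugadas) []

-- ===== PORT B =====
def proyector_de_jugadas_del_jugador_alt (mesaDeJuego : List (List (List Int))) (indice_jugador : Int) : List (List Int) :=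
  let tablero := (PySem.List.pyGet? mesaDeJuego indice_jugador).getD []
  -- block = [(j, 1) for j in range(3) if any(tablero[j][k] == 0 for k in range(3))]
  let block := ((List.range 3).filter (fun (j : Nat) =>
      (List.range 3).any (fun (k : Nat) =>
        PySem.List.pyGet? ((PySem.List.pyGet? tablero (j : Int)).getD []) (k : Int) == some (0 : Int)))).map
      (fun (j : Nat) => (j, (1 : Int)))
  -- for _ in range(6): extend jugadas with the block, then bump the block's die value
  ((List.range 6).foldl (fun (st : List (List Int) × List (Nat × Int)) _ =>
      (st.1 ++ st.2.map (fun jv => [(jv.1 : Int), jv.2]),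
       st.2.map (fun jv => (jv.1, jv.2 + 1)))) ([], block)).1

-- ===== PRECONDITION & SPEC =====
-- Pre_ excludes exactly the inputs where Python A raises IndexError: an invalid player
-- index, a board with fewer than 3 rows, or a scanned row that is shorter than 3 and
-- has no zero in it (a zero breaks the k-scan before the short row is exhausted).
def Pre_proyector_de_jugadas_del_jugador (mesaDeJuego : List (List (List Int))) (indice_jugador : Int) : Prop :=
  ∃ b, PySem.List.pyGet? mesaDeJuego indice_jugador = some b ∧ 3 ≤ b.length ∧
    ∀ r ∈ b.take 3, 3 ≤ r.length ∨ (0 : Int) ∈ r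
instance (mesaDeJuego : List (List (List Int))) (indice_jugador : Int) : Decidable (Pre_proyector_de_jugadas_del_jugador mesaDeJuego indice_jugador) := by unfold Pre_proyector_de_jugadas_del_jugador; infer_instance

def pvWitness_proyector_de_jugadas_del_jugador : List (List (List Int)) × Int :=
  ([[[5, 0, 5], [4, 4, 4], [5, 5, 0]], [[7, 7, 7], [7, 0, 7], [7, 7, 7]]], 1)

def Spec_proyector_de_jugadas_del_jugador (mesaDeJuego : List (List (List Int))) (indice_jugador : Int) (out : List (List Int)) : Prop := out = proyector_de_jugadas_del_jugador_alt mesaDeJuego indice_jugador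
instance (mesaDeJuego : List (List (List Int))) (indice_jugador : Int) (out : List (List Int)) : Decidable (Spec_proyector_de_jugadas_del_jugador mesaDeJuego indice_jugador out) := by unfold Spec_proyector_de_jugadas_del_jugador; infer_instance

-- ===== CLAIM =====
def Claim_equal_proyector_de_jugadas_del_jugador : Prop := ∀ (mesaDeJuego : List (List (List Int))) (indice_jugador : Int), Dom_proyector_de_jugadas_del_jugador mesaDeJuego indice_jugador → Pre_proyector_de_jugadas_del_jugador mesaDeJuego indice_jugador → Spec_proyector_de_jugadas_del_jugador mesaDeJuego indice_jugador (proyector_de_jugadas_del_jugador mesaDeJuego indice_jugador)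

-- ===== LEMMAS AND PROOFS =====
-- A's triple subscript written as B reads it: failed lookups default to [], whose lookups fail
theorem pvCell_eq (m : List (List (List Int))) (p : Int) (j k : Nat) :
    pvCellA m p j k
      = PySem.List.pyGet? ((PySem.List.pyGet? ((PySem.List.pyGet? m p).getD []) (j : Int)).getD []) (k : Int) := by
  unfold pvCellA
  cases hp : PySem.List.pyGet? m p with
  | none => simp [PySem.List.pyGet?, PySem.List.pyIdx?]
  | some b =>
    simp only [Option.getD_some]
    cases hb : PySem.List.pyGet? b (j : Int) with
    | none => simp [PySem.List.pyGet?, PySem.List.pyIdx?]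
    | some r => simp

-- B's row-emptiness test (any of the cells k = 0, 1, 2 is zero) agrees with A's break-scan
theorem pvRow_eq (m : List (List (List Int))) (p : Int) (j : Nat) :
    ((List.range 3).any (fun (k : Nat) =>
        PySem.List.pyGet? ((PySem.List.pyGet? ((PySem.List.pyGet? m p).getD []) (j : Int)).getD []) (k : Int)
          == some (0 : Int)))
      = pvRowScanA m p j [0, 1, 2] := by
  simp only [pvRowScanA, pvCell_eq]
  generalize (PySem.List.pyGet? ((PySem.List.pyGet? m p).getD []) (j : Int)).getD [] = r
  have h3 : List.range 3 = [0, 1, 2] := rfl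
  rw [h3]
  simp only [List.any_cons, List.any_nil]
  simp [beq_eq_decide]

-- a fold that conditionally appends one element equals filter-then-map
theorem pvFoldIf (c : Nat → Bool) (f : Nat → List Int) (l : List Nat) (acc : List (List Int)) :
    l.foldl (fun a j => if c j then a ++ [f j] else a) acc = acc ++ (l.filter c).map f := by
  induction l generalizing acc with
  | nil => simp
  | cons x xs ih => by_cases h : c x <;> simp [h, ih]

-- a fold that appends blocks equals flatMap
theorem pvFoldApp (g : Nat → List (List Int)) (l : List Nat) (acc : List (List Int)) :
    l.foldl (fun a i => a ++ g i) acc = acc ++ l.flatMap g := by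
  induction l generalizing acc with
  | nil => simp
  | cons x xs ih => simp [ih]

-- A's nested fold equals flatMap over die values of the filtered rows
theorem pvA_flat (m : List (List (List Int))) (p : Int) :
    proyector_de_jugadas_del_jugador m p
      = (List.range 6).flatMap (fun (i : Nat) =>
          ((List.range 3).filter (fun (j : Nat) => pvRowScanA m p j [0, 1, 2])).map
            (fun (j : Nat) => ([(j : Int), (i : Int) + 1] : List Int))) := by
  unfold proyector_de_jugadas_del_jugador
  simp only [pvFoldIf (fun j => pvRowScanA m p j [0, 1, 2]), pvFoldApp, List.nil_append]

-- the block-bumping loop, characterised: starting from die value c, n steps emit the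
-- n blocks with die values c, c+1, …, leaving the block bumped n times
theorem pvLoop (n : Nat) (acc : List (List Int)) (c : Int) (filas : List Nat) :
    (List.range n).foldl (fun (st : List (List Int) × List (Nat × Int)) _ =>
        (st.1 ++ st.2.map (fun jv => [(jv.1 : Int), jv.2]),
         st.2.map (fun jv => (jv.1, jv.2 + 1)))) (acc, filas.map (fun (j : Nat) => (j, c)))
      = (acc ++ (List.range n).flatMap (fun (i : Nat) =>
            filas.map (fun (j : Nat) => ([(j : Int), c + (i : Int)] : List Int))),
         filas.map (fun (j : Nat) => (j, c + (n : Int)))) := by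
  induction n generalizing acc c with
  | zero => simp
  | succ n ih =>
    rw [List.range_succ, List.foldl_append, ih]
    simp only [List.foldl_cons, List.foldl_nil]
    refine Prod.ext ?_ ?_
    · simp only [List.flatMap_append, List.flatMap_cons, List.flatMap_nil,
        List.append_nil, List.append_assoc, List.map_map, Function.comp_def]
    · simp only [List.map_map, Function.comp_def]
      have : ∀ j : Nat, ((j, c + (n : Int) + 1) : Nat × Int) = (j, c + ((n : Nat) + 1 : Nat)) := by
        intro j; push_cast; ring_nf
      simp only [this]

-- ===== VERDICT =====
theorem proyector_de_jugadas_del_jugador_spec : Claim_equal_proyector_de_jugadas_del_jugador := by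
  intro m p _ _
  unfold Spec_proyector_de_jugadas_del_jugador proyector_de_jugadas_del_jugador_alt
  simp only [pvRow_eq m p]
  rw [pvLoop 6 [] 1, pvA_flat]
  have h1 : ∀ i : Nat, (i : Int) + 1 = 1 + (i : Int) := fun i => by omega
  simp only [h1, List.nil_append]
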